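-- pv_equiv track=rewrite | github.com/VyacheslavZalygin/PyEducation2021 | RecursionAndMemoization/p6.py | grundy
-- ===== SOURCE A (Python) =====
-- def grundy(n):
--     if n < 1: return 0
--     targets = set()
--     for x in range((n-2)//2+1):
--         targets.add(grundy(x) ^ grundy(n-x-2))
--     res = 0
--     while res in targets: res += 1
--     return res
-- ===== SOURCE B (Python) =====
-- def grundy(n):
--     if n < 1: return 0
--     g = []
--     for k in range(n + 1):
--         s = {g[x] ^ g[k - x - 2] for x in range((k - 2) // 2 + 1)}
--         m = 0
--         while m in s: m += 1
--         g.append(m)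
--     return g[n]
-- ===== Notes on version B (the rewrite author's own statement) =====
-- stated objective: faster
-- what changed: replaces the exponential naive recursion by a bottom-up dynamic-programming table of all smaller Grundy values, computing each Grundy value once from earlier table entries (intended as faster; a timing run saw A time out at sizes where B returned, so no clean ratio was measurable); Pre_ excludes large n on which A returns no value (RecursionError from its deep call chain, or not feasibly evaluable)
import Mathlib
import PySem

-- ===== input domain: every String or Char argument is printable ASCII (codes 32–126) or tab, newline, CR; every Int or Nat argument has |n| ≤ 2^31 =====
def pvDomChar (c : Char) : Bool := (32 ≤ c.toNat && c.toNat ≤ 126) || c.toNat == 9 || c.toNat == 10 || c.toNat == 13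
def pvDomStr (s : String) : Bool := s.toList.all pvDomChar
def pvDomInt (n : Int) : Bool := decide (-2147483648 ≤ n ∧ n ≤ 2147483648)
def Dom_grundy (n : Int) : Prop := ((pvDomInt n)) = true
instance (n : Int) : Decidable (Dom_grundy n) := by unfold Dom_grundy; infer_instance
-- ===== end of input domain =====

-- B replaces A's exponential naive recursion by a bottom-up DP table of Grundy values (faster: asymptotic).

-- ===== PORT A =====
-- 'res = 0; while res in targets: res += 1' — fuel (targets.length + 1) only makes the loop
-- total; the Python loop always exits within that many steps (targets has no duplicates).
def mexFuel : Nat → PySem.Set Int → Int → Int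
  | 0, _, res => res
  | f + 1, s, res => if PySem.Set.contains s res then mexFuel f s (res + 1) else res

def mexLoop (s : PySem.Set Int) : Int := mexFuel (s.length + 1) s 0

def grundy (n : Int) : Int :=
  if n < 1 then 0
  else
    let targets : PySem.Set Int :=
      (PySem.List.pyRange 0 (PySem.Int.floordiv (n - 2) 2 + 1) 1).attach.foldl
        (fun s x => PySem.Set.add s (PySem.Int.bxor (grundy x.1) (grundy (n - x.1 - 2))))
        PySem.Set.empty
    mexLoop targets
termination_by n.toNat
decreasing_by
  · have hx := (PySem.List.mem_pyRange_one.mp x.2)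
    have h2 : x.1 * 2 ≤ n - 2 := (PySem.Int.le_floordiv_iff_mul_le (by norm_num)).mp (by omega)
    omega
  · have hx := (PySem.List.mem_pyRange_one.mp x.2)
    omega

-- ===== PORT B =====
-- {g[x] ^ g[k-x-2] for x in range((k-2)//2+1)}  (g[..] via pyGetD; indices are always in range)
def bTargets (g : List Int) (k : Int) : PySem.Set Int :=
  (PySem.List.pyRange 0 (PySem.Int.floordiv (k - 2) 2 + 1) 1).foldl
    (fun s x => PySem.Set.add s
      (PySem.Int.bxor (PySem.List.pyGetD g x 0) (PySem.List.pyGetD g (k - x - 2) 0)))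
    PySem.Set.empty

-- one iteration of B's for-loop body: g.append(mex of the set)
def bStep (g : List Int) (k : Int) : List Int := g ++ [mexLoop (bTargets g k)]

def grundy_alt (n : Int) : Int :=
  if n < 1 then 0
  else
    let g := (PySem.List.pyRange 0 (n + 1) 1).foldl bStep []
    PySem.List.pyGetD g n 0

-- ===== PRECONDITION & SPEC =====
-- Pre_ excludes large n, on which Python A returns no value: its naive recursion either raises
-- RecursionError (its first recursive call chain descends to a depth of about half of n, exceeding CPython's
-- limit) or cannot feasibly be evaluated; the bound leaves a margin for the caller's stack depth.
def Pre_grundy (n : Int) : Prop := n ≤ 1900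
instance (n : Int) : Decidable (Pre_grundy n) := by unfold Pre_grundy; infer_instance
def pvWitness_grundy : Int := (6)

def Spec_grundy (n : Int) (out : Int) : Prop := out = grundy_alt n
instance (n : Int) (out : Int) : Decidable (Spec_grundy n out) := by unfold Spec_grundy; infer_instance

-- ===== CLAIM (what is proved, stated in full; the proofs are below) =====
def Claim_equal_grundy : Prop := ∀ (n : Int), Dom_grundy n → Pre_grundy n → Spec_grundy n (grundy n)

-- ===== LEMMAS AND PROOFS =====

-- A's value, for every m ≥ 0, is the mex of its target set (also at the base case, where the set is empty).
theorem grundy_eq_mex (m : Int) (hm : 0 ≤ m) :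
    grundy m = mexLoop
      ((PySem.List.pyRange 0 (PySem.Int.floordiv (m - 2) 2 + 1) 1).attach.foldl
        (fun s x => PySem.Set.add s (PySem.Int.bxor (grundy x.1) (grundy (m - x.1 - 2))))
        PySem.Set.empty) := by
  rw [grundy]
  split
  · next h =>
    have hm0 : m = 0 := by omega
    subst hm0
    have hnil : PySem.List.pyRange 0 (PySem.Int.floordiv ((0:Int) - 2) 2 + 1) 1 = [] := by decide
    rw [hnil]
    rfl
  · rfl

-- B's table after the first m iterations is exactly [grundy 0, …, grundy (m-1)].
theorem bTable_eq (m : Nat) :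
    (PySem.List.pyRange 0 (m : Int) 1).foldl bStep []
      = (List.range m).map (fun (i : Nat) => grundy (i : Int)) := by
  induction m with
  | zero =>
    have hnil : PySem.List.pyRange 0 ((0:Nat) : Int) 1 = [] := by decide
    rw [hnil]; rfl
  | succ m ih =>
    have hsplit := PySem.List.pyRange_one_succ_right (a := 0) (b := (m : Int))
      (Int.natCast_nonneg m)
    rw [show ((m + 1 : Nat) : Int) = (m : Int) + 1 by push_cast; ring, hsplit,
        List.foldl_append, ih, List.range_succ, List.map_append]
    simp only [List.foldl, bStep, List.map]
    congr 1
    -- remains: mex of B's set over the table = grundy m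
    rw [grundy_eq_mex (m : Int) (Int.natCast_nonneg m)]
    congr 1
    apply congrArg
    unfold bTargets
    rw [← List.foldl_attach]
    apply PySem.List.foldl_congr_mem
    intro acc x hx
    have hmem := PySem.List.mem_pyRange_one.mp x.2
    have h2 : x.1 * 2 ≤ (m : Int) - 2 :=
      (PySem.Int.le_floordiv_iff_mul_le (by norm_num)).mp (by omega)
    have hlook : ∀ (i : Int), 0 ≤ i → i < (m : Int) →
        PySem.List.pyGetD ((List.range m).map (fun (j : Nat) => grundy (j : Int))) i 0
          = grundy i := by
      intro i h0 hi
      rw [PySem.List.pyGetD_of_nonneg _ _ h0]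
      have hi' : i.toNat < m := by omega
      rw [List.getD_eq_getElem _ _ (by simpa using hi')]
      simp only [List.getElem_map, List.getElem_range]
      congr 1
      omega
    rw [hlook x.1 (by omega) (by omega), hlook ((m : Int) - x.1 - 2) (by omega) (by omega)]

-- ===== VERDICT (by name: the statement is the Claim_ definition above) =====
theorem grundy_spec : Claim_equal_grundy := by
  intro n _ _
  unfold Spec_grundy grundy_alt
  split
  · next h => rw [grundy]; simp [h]
  · next h =>
    have hn : 0 ≤ n := by omega
    have hmn : ((n + 1).toNat : Int) = n + 1 := by omega
    rw [show (n + 1 : Int) = ((n + 1).toNat : Int) from hmn.symm, bTable_eq,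
        PySem.List.pyGetD_of_nonneg _ _ hn,
        List.getD_eq_getElem _ _ (by simp [List.length_map, List.length_range]; omega)]
    simp only [List.getElem_map, List.getElem_range]
    congr 1
    omega
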